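-- pv_equiv track=rewrite | github.com/dennisjernkrookratio/kolada_mcp | kolada-mcp.py | _group_kpis_by_operating_area
-- ===== SOURCE A (Python) =====
-- from typing import Any, AsyncIterator, TypedDict, cast
--
-- class KoladaKpi(TypedDict, total=False):
--     """
--     Represents a single Key Performance Indicator (KPI) from Kolada.
--     Kolada (Kommun- och landstingsdatabasen) provides ~6,500 KPIs
--     covering Swedish municipalities and regions across various sectors
--     like economy, schools, healthcare, environment, etc.
--     """
--
--     id: str  # The unique identifier for the KPI (e.g., "N00945")
--     title: str  # The human-readable name of the KPI (e.g., "Population size")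
--     description: str  # A longer explanation of the KPI.
--     operating_area: str  # The thematic category/categories (e.g., "Demographics", "Economy,Environment")
--
-- def _group_kpis_by_operating_area(
--     kpis: list[KoladaKpi],
-- ) -> dict[str, list[KoladaKpi]]:
--     """Groups KPIs by their 'operating_area' field."""
--     grouped: dict[str, list[KoladaKpi]] = {}
--     for kpi in kpis:
--         operating_area_field: str = kpi.get("operating_area", "Unknown")
--         areas: list[str] = [a.strip() for a in operating_area_field.split(",")]
--         for area in areas:
--             if area:
--                 if area not in grouped:
--                     grouped[area] = []
--                 grouped[area].append(kpi)
--     return grouped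
-- ===== SOURCE B (Python) =====
-- def _group_kpis_by_operating_area(kpis):
--     """Groups KPIs by their 'operating_area' field (flat pair list, then key-major assembly)."""
--     pairs = [(area, kpi)
--              for kpi in kpis
--              for area in (a.strip() for a in kpi.get("operating_area", "Unknown").split(","))
--              if area]
--     keys = list(dict.fromkeys(area for area, _ in pairs))
--     return {k: [kpi for area, kpi in pairs if area == k] for k in keys}
-- ===== Notes on version B (the rewrite author's own statement) =====
-- stated objective: alternative
-- what changed: Replaces A's one-pass incremental dict insertion with a build-then-assemble scheme: first flatten all (area, kpi) pairs, then collect the first-occurrence-ordered distinct areas and assemble each group by a scan over the flat pair list.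
import Mathlib
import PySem

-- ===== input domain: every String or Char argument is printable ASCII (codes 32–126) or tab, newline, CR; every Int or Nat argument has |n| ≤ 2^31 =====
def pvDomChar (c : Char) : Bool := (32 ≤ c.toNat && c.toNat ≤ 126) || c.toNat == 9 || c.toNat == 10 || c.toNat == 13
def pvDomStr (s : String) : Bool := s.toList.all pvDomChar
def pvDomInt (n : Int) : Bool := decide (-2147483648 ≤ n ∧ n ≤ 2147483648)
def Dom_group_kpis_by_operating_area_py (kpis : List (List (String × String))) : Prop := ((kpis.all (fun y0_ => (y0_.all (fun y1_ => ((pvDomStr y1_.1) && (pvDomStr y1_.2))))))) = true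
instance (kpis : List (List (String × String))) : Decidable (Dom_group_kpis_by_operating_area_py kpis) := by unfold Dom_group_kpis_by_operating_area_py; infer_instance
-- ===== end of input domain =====

-- B replaces A's incremental dict-append grouping by building the flat (area, kpi) pair list first
-- and then assembling each group key-by-key (first-occurrence key order); alternative decomposition.

-- ===== PORT A =====
-- kpi.get("operating_area", "Unknown") is a first-match dict lookup; oaf.split(",") is
-- PySem.Str.split? (exact here since the separator "," is nonempty, so split? is always some)
def group_kpis_by_operating_area_py (kpis : List (List (String × String))) : List (String × List (List (String × String))) :=
  (kpis.foldl (fun grouped kpi =>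
      let operating_area_field : String := (PySem.Dict.mk kpi).getD "operating_area" "Unknown"
      let areas : List String := ((PySem.Str.split? operating_area_field ",").getD []).map PySem.Str.strip
      areas.foldl (fun grouped area =>
        if area != "" then
          let grouped := if grouped.contains area then grouped else grouped.insert area []
          grouped.modify area [] (fun l => l ++ [kpi])
        else grouped) grouped)
    PySem.Dict.empty).items

-- ===== PORT B =====
-- the (area, kpi) pairs contributed by one kpi (comma-split, stripped, empties dropped)
def gkoa_pairsOf (kpi : List (String × String)) : List (String × List (String × String)) :=
  ((((PySem.Str.split? ((PySem.Dict.mk kpi).getD "operating_area" "Unknown") ",").getD []).map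
      PySem.Str.strip).filter (fun a => a != "")).map (fun a => (a, kpi))

-- Source B's flat pair list (the double comprehension)
def gkoa_pairs (kpis : List (List (String × String))) : List (String × List (String × String)) :=
  kpis.flatMap gkoa_pairsOf

def group_kpis_by_operating_area_py_alt (kpis : List (List (String × String))) : List (String × List (List (String × String))) :=
  let pairs := gkoa_pairs kpis
  let keys := PySem.List.dedup (pairs.map (fun p => p.1))
  keys.map (fun k => (k, (pairs.filter (fun p => p.1 == k)).map (fun p => p.2)))

-- ===== PRECONDITION & SPEC =====
def Spec_group_kpis_by_operating_area_py (kpis : List (List (String × String))) (out : List (String × List (List (String × String)))) : Prop := out = group_kpis_by_operating_area_py_alt kpis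
instance (kpis : List (List (String × String))) (out : List (String × List (List (String × String)))) : Decidable (Spec_group_kpis_by_operating_area_py kpis out) := by unfold Spec_group_kpis_by_operating_area_py; infer_instance

-- ===== CLAIM (what is proved, stated in full; the proofs are below) =====
def Claim_equal_group_kpis_by_operating_area_py : Prop := ∀ (kpis : List (List (String × String))), Dom_group_kpis_by_operating_area_py kpis → Spec_group_kpis_by_operating_area_py kpis (group_kpis_by_operating_area_py kpis)

-- ===== LEMMAS AND PROOFS =====

-- A's "ensure key exists, then append" compound step is a single Python-style modify
theorem pv_step_eq {β : Type} (d : PySem.Dict String (List β)) (k : String) (f : List β → List β) :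
    (if d.contains k then d else d.insert k []).modify k [] f = d.modify k [] f := by
  by_cases h : d.contains k = true
  · simp [h]
  · have h' : d.contains k = false := by simpa using h
    simp [h', PySem.Dict.modify, PySem.Dict.getD_insert_self,
      PySem.Dict.insert_insert_self, PySem.Dict.getD_of_not_contains d ([] : List β) h']

-- A's inner loop over one kpi's areas is the modify-fold over that kpi's (area, kpi) pairs
theorem pv_inner (d : PySem.Dict String (List (List (String × String))))
    (kpi : List (String × String)) (areas : List String) :
    areas.foldl (fun grouped area =>
        if area != "" then
          let grouped := if grouped.contains area then grouped else grouped.insert area []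
          grouped.modify area [] (fun l => l ++ [kpi])
        else grouped) d =
    ((areas.filter (fun a => a != "")).map (fun a => (a, kpi))).foldl
      (fun d p => d.modify p.1 [] (fun l => l ++ [p.2])) d := by
  simp only [List.foldl_map]
  rw [← PySem.List.foldl_if_eq_foldl_filter (p := fun a => a != "")
      (f := fun (g : PySem.Dict String (List (List (String × String)))) a =>
        g.modify a [] (fun l => l ++ [kpi]))]
  refine PySem.List.foldl_congr_mem areas _ _ d ?_
  intro acc a _
  by_cases h : (a != "") = true
  · simp only [h, if_true]
    exact pv_step_eq acc a _
  · simp [h]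

-- A's whole loop, from any start dict, is the modify-fold over B's flat pair list
theorem pv_outer (kpis : List (List (String × String)))
    (d : PySem.Dict String (List (List (String × String)))) :
    kpis.foldl (fun grouped kpi =>
      let operating_area_field : String := (PySem.Dict.mk kpi).getD "operating_area" "Unknown"
      let areas : List String := ((PySem.Str.split? operating_area_field ",").getD []).map PySem.Str.strip
      areas.foldl (fun grouped area =>
        if area != "" then
          let grouped := if grouped.contains area then grouped else grouped.insert area []
          grouped.modify area [] (fun l => l ++ [kpi])
        else grouped) grouped) d =
    (gkoa_pairs kpis).foldl (fun d p => d.modify p.1 [] (fun l => l ++ [p.2])) d := by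
  induction kpis generalizing d with
  | nil => rfl
  | cons kpi rest ih =>
    rw [List.foldl_cons,
      show gkoa_pairs (kpi :: rest) = gkoa_pairsOf kpi ++ gkoa_pairs rest by
        simp [gkoa_pairs],
      List.foldl_append, ih]
    congr 1
    exact pv_inner d kpi _

-- ===== VERDICT (by name: the statement is the Claim_ definition above) =====
theorem group_kpis_by_operating_area_py_spec : Claim_equal_group_kpis_by_operating_area_py := by
  intro kpis _
  unfold Spec_group_kpis_by_operating_area_py
  unfold group_kpis_by_operating_area_py group_kpis_by_operating_area_py_alt
  rw [pv_outer kpis PySem.Dict.empty]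
  show (List.foldl (fun d p => d.modify p.1 [] (fun l => l ++ [p.2])) PySem.Dict.empty
      (gkoa_pairs kpis)).items =
    (PySem.List.dedup ((gkoa_pairs kpis).map (fun p => p.1))).map
      (fun k => (k, ((gkoa_pairs kpis).filter (fun p => p.1 == k)).map (fun p => p.2)))
  have hnd : (List.foldl (fun d p => d.modify p.1 [] (fun l => l ++ [p.2])) PySem.Dict.empty
      (gkoa_pairs kpis)).keys.Nodup :=
    PySem.Dict.nodup_keys_foldl_modify_key (gkoa_pairs kpis) (fun p => p.1) []
      (fun _ p l => l ++ [p.2]) PySem.Dict.empty (by simp [PySem.Dict.keys_empty])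
  have hkeys : (List.foldl (fun d p => d.modify p.1 [] (fun l => l ++ [p.2])) PySem.Dict.empty
      (gkoa_pairs kpis)).keys =
      PySem.Set.update PySem.Dict.empty.keys ((gkoa_pairs kpis).map (fun p => p.1)) :=
    PySem.Dict.keys_foldl_modify_key (gkoa_pairs kpis) (fun p => p.1) []
      (fun _ p l => l ++ [p.2]) PySem.Dict.empty
  have hupd : PySem.Set.update (PySem.Dict.empty (κ := String)
        (ν := List (List (String × String)))).keys ((gkoa_pairs kpis).map (fun p => p.1)) =
      PySem.List.dedup ((gkoa_pairs kpis).map (fun p => p.1)) := by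
    simp [PySem.Dict.keys_empty, PySem.Set.update, PySem.List.dedup_eq_ofList,
      PySem.Set.ofList_eq_foldl]
  rw [PySem.Dict.items_eq_map_keys _ hnd [], hkeys, hupd]
  refine List.map_congr_left ?_
  intro k _
  have hg := PySem.Dict.getD_foldl_modify_append (gkoa_pairs kpis) PySem.Dict.empty k
  simp only [PySem.Dict.getD_empty, List.nil_append] at hg
  rw [hg]
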